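-- pv_equiv track=rewrite | github.com/bssrdf/pyleet | S/SmallestMissingNon-negativeIntegerAfterOperations.py | findSmallestInteger
-- ===== SOURCE A (Python) =====
-- from typing import List
-- from collections import Counter
--
-- def findSmallestInteger(nums: List[int], value: int) -> int:
--     st = Counter()
--     for x in nums:
--         st[x % value] += 1
--     l, r = 0, len(nums) + 1
--     def possible(m):
--         s = Counter(st)
--         for i in range(m):
--             j = i % value
--             if j not in s:
--                 return False
--             else:
--                 s[j] -= 1
--                 if s[j] == 0:
--                     s.pop(j)
--         return True
--     while l < r:
--         mid = l + (r-l)//2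
--         if possible(mid):
--             l = mid + 1
--         else:
--             r = mid
--     return l-1
-- ===== SOURCE B (Python) =====
-- from typing import List
-- from collections import Counter
--
-- def findSmallestInteger(nums: List[int], value: int) -> int:
--     v = abs(value)
--     cnt = Counter(x % value for x in nums)
--     return min(cnt[r % value] * v + r for r in range(min(v, len(nums) + 1)))
-- ===== Notes on version B (the rewrite author's own statement) =====
-- stated objective: alternative
-- what changed: A binary-searches the answer, replaying Counter decrements over range(mid) for every probe; B computes the closed form min over residues r < min(|value|, n+1) of count[r]*|value| + r in one counting pass.
-- outside the precondition, e.g. on findSmallestInteger([], 0): A returns 0, B raises ValueError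
import Mathlib
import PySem

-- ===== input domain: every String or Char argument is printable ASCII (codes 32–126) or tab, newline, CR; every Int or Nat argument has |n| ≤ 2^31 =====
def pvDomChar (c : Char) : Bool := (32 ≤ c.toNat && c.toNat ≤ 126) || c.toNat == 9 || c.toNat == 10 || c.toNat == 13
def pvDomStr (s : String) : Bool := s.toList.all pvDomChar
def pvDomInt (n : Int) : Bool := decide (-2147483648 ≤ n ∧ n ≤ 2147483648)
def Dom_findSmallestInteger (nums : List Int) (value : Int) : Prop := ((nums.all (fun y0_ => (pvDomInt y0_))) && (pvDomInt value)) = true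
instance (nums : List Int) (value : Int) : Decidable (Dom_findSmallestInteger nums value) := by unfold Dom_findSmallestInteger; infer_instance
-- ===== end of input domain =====

-- B replaces A's binary search over a replay of Counter decrements by the closed form
-- min over residues r of cnt[r]*|value| + r, computed in a single counting pass.

-- ===== PORT A =====
-- st = Counter(); for x in nums: st[x % value] += 1
def pvStA (nums : List Int) (value : Int) : PySem.Dict Int Int :=
  nums.foldl (fun st x => st.modify (PySem.Int.mod x value) 0 (· + 1)) PySem.Dict.empty

-- the body of possible(m): for i in range(m): j = i % value; if j not in s: return False
-- else: s[j] -= 1; if s[j] == 0: s.pop(j)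
def pvPossibleGo (value : Int) (s : PySem.Dict Int Int) : List Int → Bool
  | [] => true
  | i :: rest =>
    let j := PySem.Int.mod i value
    if s.contains j = false then false
    else
      let s1 := s.insert j (s.getD j 0 - 1)
      if s1.getD j 0 = 0 then pvPossibleGo value (s1.erase j) rest
      else pvPossibleGo value s1 rest

def pvPossible (st : PySem.Dict Int Int) (value m : Int) : Bool :=
  pvPossibleGo value st (PySem.List.pyRange 0 m 1)

-- while l < r: mid = l + (r-l)//2; if possible(mid): l = mid+1 else: r = mid
def pvBSearch (st : PySem.Dict Int Int) (value l r : Int) : Int :=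
  if h : l < r then
    let mid := l + PySem.Int.floordiv (r - l) 2
    if pvPossible st value mid then pvBSearch st value (mid + 1) r
    else pvBSearch st value l mid
  else l
termination_by (r - l).toNat
decreasing_by
  · have h2 : PySem.Int.floordiv (r - l) 2 = (r - l) / 2 := PySem.Int.floordiv_eq_ediv_of_pos (by omega)
    simp only [mid, h2]; omega
  · have h2 : PySem.Int.floordiv (r - l) 2 = (r - l) / 2 := PySem.Int.floordiv_eq_ediv_of_pos (by omega)
    simp only [mid, h2]; omega

def findSmallestInteger (nums : List Int) (value : Int) : Int :=
  pvBSearch (pvStA nums value) value 0 ((nums.length : Int) + 1) - 1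

-- ===== PORT B =====
-- v = abs(value); cnt = Counter(x % value for x in nums)
-- return min(cnt[r % value] * v + r for r in range(min(v, len(nums) + 1)))
def findSmallestInteger_alt (nums : List Int) (value : Int) : Int :=
  let v := |value|
  let cnt := PySem.Dict.counter (nums.map (fun x => PySem.Int.mod x value))
  (PySem.List.min?
    ((PySem.List.pyRange 0 (min v ((nums.length : Int) + 1)) 1).map
      (fun r => cnt.getD (PySem.Int.mod r value) 0 * v + r))
    (fun t => t)).getD 0

-- ===== PRECONDITION & SPEC =====
-- Pre_ excludes value = 0: there A raises ZeroDivisionError, except on the degenerate input nums = []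
-- where A's binary search exits before ever computing % 0 and accidentally returns 0; B raises there too.
def Pre_findSmallestInteger (nums : List Int) (value : Int) : Prop := value ≠ 0
instance (nums : List Int) (value : Int) : Decidable (Pre_findSmallestInteger nums value) := by unfold Pre_findSmallestInteger; infer_instance
def pvWitness_findSmallestInteger : List Int × Int := ([0, 3, 5], 3)

def Spec_findSmallestInteger (nums : List Int) (value : Int) (out : Int) : Prop := out = findSmallestInteger_alt nums value
instance (nums : List Int) (value : Int) (out : Int) : Decidable (Spec_findSmallestInteger nums value out) := by unfold Spec_findSmallestInteger; infer_instance

-- ===== CLAIM (what is proved, stated in full; the proofs are below) =====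
def Claim_equal_findSmallestInteger : Prop := ∀ (nums : List Int) (value : Int), Dom_findSmallestInteger nums value → Pre_findSmallestInteger nums value → Spec_findSmallestInteger nums value (findSmallestInteger nums value)

-- ===== LEMMAS AND PROOFS =====

-- count of nums in residue class r (Euclidean residues of v = |value|)
def pvC (nums : List Int) (v r : Int) : Nat := nums.countP (fun x => x % v == r)
-- the first non-negative integer of class r that nums cannot cover
def pvT (nums : List Int) (v r : Int) : Int := (pvC nums v r : Int) * v + r
-- residue count over range(m)
def pvRC (v m r : Int) : Nat := (PySem.List.pyRange 0 m 1).countP (fun i => i % v == r)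
-- count of elements with residue below K
def pvG (v : Int) (l : List Int) (K : Int) : Nat := l.countP (fun x => decide (x % v < K))

lemma pv_mod_eq_iff (value a b : Int) (hv : value ≠ 0) :
    PySem.Int.mod a value = PySem.Int.mod b value ↔ a % |value| = b % |value| := by
  have hda : |value| ∣ PySem.Int.mod a value - a := by
    refine (abs_dvd _ _).mpr ⟨-PySem.Int.floordiv a value, ?_⟩
    have := PySem.Int.floordiv_mul_add_mod a value
    linarith [this]
  have hdb : |value| ∣ PySem.Int.mod b value - b := by
    refine (abs_dvd _ _).mpr ⟨-PySem.Int.floordiv b value, ?_⟩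
    have := PySem.Int.floordiv_mul_add_mod b value
    linarith [this]
  have hva : PySem.Int.mod a value % |value| = a % |value| :=
    Int.ModEq.symm (Int.modEq_iff_dvd.mpr hda)
  have hvb : PySem.Int.mod b value % |value| = b % |value| :=
    Int.ModEq.symm (Int.modEq_iff_dvd.mpr hdb)
  constructor
  · intro h; rw [← hva, ← hvb, h]
  · intro h
    have hdd : |value| ∣ PySem.Int.mod b value - PySem.Int.mod a value := by
      refine Int.modEq_iff_dvd.mp ?_
      show _ % _ = _ % _
      rw [hva, hvb, h]
    have hbnd : |PySem.Int.mod b value - PySem.Int.mod a value| < |value| := by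
      rcases lt_or_gt_of_ne hv with hneg | hpos
      · have h1 := PySem.Int.mod_neg_bounds a hneg
        have h2 := PySem.Int.mod_neg_bounds b hneg
        rw [abs_of_neg hneg, abs_lt]; omega
      · have h1 := PySem.Int.mod_nonneg a hpos
        have h2 := PySem.Int.mod_nonneg b hpos
        have h3 := PySem.Int.mod_lt a hpos
        have h4 := PySem.Int.mod_lt b hpos
        rw [abs_of_pos hpos, abs_lt]; omega
    have := Int.eq_zero_of_abs_lt_dvd hdd hbnd
    omega

lemma pv_stA_eq (nums : List Int) (value : Int) :
    pvStA nums value = PySem.Dict.counter (nums.map (fun x => PySem.Int.mod x value)) := by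
  rw [PySem.Dict.counter_eq_foldl, List.foldl_map]
  rfl

lemma pv_find?_filter_ne (items : List (Int × Int)) (j : Int) :
    List.find? (fun p => p.1 == j) (items.filter (fun p => !(p.1 == j))) = none := by
  rw [List.find?_eq_none]
  intro p hp
  simp only [List.mem_filter] at hp
  simpa using hp.2

lemma pv_get?_erase (d : PySem.Dict Int Int) (j k : Int) :
    (d.erase j).get? k = if k = j then none else d.get? k := by
  rcases d with ⟨items⟩
  simp only [PySem.Dict.erase, PySem.Dict.get?]
  by_cases hkj : k = j
  · subst hkj
    simp [pv_find?_filter_ne items k]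
  · simp only [if_neg hkj]
    induction items with
    | nil => simp
    | cons p rest ih =>
      simp only [List.filter_cons]
      rcases Bool.eq_false_or_eq_true (p.1 == j) with hpj | hpj <;>
        rcases Bool.eq_false_or_eq_true (p.1 == k) with hpk | hpk
      · exfalso
        simp only [beq_iff_eq] at hpj hpk
        exact hkj (hpk ▸ hpj)
      · rw [if_neg (by rw [hpj]; simp),
           List.find?_cons_of_neg (p := fun q : Int × Int => q.1 == k) (by simp_all)]
        exact ih
      · rw [if_pos (by rw [hpj]; rfl),
           List.find?_cons_of_pos (p := fun q : Int × Int => q.1 == k) (by simp_all),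
           List.find?_cons_of_pos (p := fun q : Int × Int => q.1 == k) (by simp_all)]
      · rw [if_pos (by rw [hpj]; rfl),
           List.find?_cons_of_neg (p := fun q : Int × Int => q.1 == k) (by simp_all),
           List.find?_cons_of_neg (p := fun q : Int × Int => q.1 == k) (by simp_all)]
        exact ih


lemma pv_G_succ (v : Int) (l : List Int) (K : Int) :
    pvG v l (K + 1) = pvG v l K + l.countP (fun x => x % v == K) := by
  unfold pvG
  induction l with
  | nil => simp
  | cons x t ih =>
    simp only [List.countP_cons, ih]
    by_cases h2 : x % v = K
    · have h1 : x % v < K + 1 := by omega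
      have h1' : ¬ x % v < K := by omega
      simp [h1, h1', h2]
      omega
    · by_cases h1 : x % v < K
      · have h1' : x % v < K + 1 := by omega
        simp [h1, h1', h2, beq_iff_eq]
        omega
      · have h1' : ¬ x % v < K + 1 := by omega
        simp [h1, h1', h2, beq_iff_eq]

lemma pv_G_zero (v : Int) (hv : 0 < v) (l : List Int) : pvG v l 0 = 0 := by
  unfold pvG
  rw [List.countP_eq_zero]
  intro x _
  simp only [decide_eq_true_eq, not_lt]
  exact Int.emod_nonneg x (by omega)

lemma pv_RC_succ (v m r : Int) (hm : 0 ≤ m) :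
    pvRC v (m + 1) r = pvRC v m r + (if m % v = r then 1 else 0) := by
  unfold pvRC
  rw [PySem.List.pyRange_one_succ_right hm, List.countP_append]
  simp [List.countP_cons, beq_iff_eq]

lemma pv_inv (v : Int) (hv : 0 < v) (r : Int) (hr : 0 ≤ r) (hrv : r < v) :
    ∀ m : Int, 0 ≤ m → m ≤ (pvRC v m r : Int) * v + r ∧ (pvRC v m r : Int) * v + r < m + v := by
  intro m hm
  induction m, hm using Int.le_induction with
  | base =>
    have : pvRC v 0 r = 0 := by unfold pvRC; simp [PySem.List.pyRange_one_eq_nil]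
    rw [this]; constructor <;> push_cast <;> omega
  | succ m hm ih =>
    rw [pv_RC_succ v m r hm]
    have h1 : ((pvRC v m r : Int) * v + r) % v = r % v := by
      rw [add_comm]; exact Int.add_mul_emod_self_right _ _ _
    have h2 : r % v = r := Int.emod_eq_of_lt hr hrv
    by_cases h : m % v = r
    · have hmod : ((pvRC v m r : Int) * v + r - m) % v = 0 := by
        have e : (pvRC v m r : Int) * v + r - m = (r - m) + (pvRC v m r : Int) * v := by ring
        rw [e, Int.add_mul_emod_self_right, Int.sub_emod, h2, h, sub_self, Int.zero_emod]
      have hdvd : v ∣ ((pvRC v m r : Int) * v + r - m) := Int.dvd_of_emod_eq_zero hmod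
      have heq : (pvRC v m r : Int) * v + r = m := by
        have := Int.eq_zero_of_abs_lt_dvd hdvd (by rw [abs_lt]; omega)
        omega
      rw [if_pos h]; push_cast; constructor <;> nlinarith [heq]
    · rw [if_neg h]
      have hne : (pvRC v m r : Int) * v + r ≠ m := by
        intro heq
        apply h
        rw [← heq, h1, h2]
      simp only [Nat.add_zero]
      omega

lemma pv_RC_le_iff (v : Int) (hv : 0 < v) (r : Int) (hr : 0 ≤ r) (hrv : r < v)
    (m : Int) (hm : 0 ≤ m) (c : Int) (hc : 0 ≤ c) :
    ((pvRC v m r : Int) ≤ c ↔ m ≤ c * v + r) := by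
  obtain ⟨h1, h2⟩ := pv_inv v hv r hr hrv m hm
  constructor
  · intro h
    calc m ≤ (pvRC v m r : Int) * v + r := h1
    _ ≤ c * v + r := by nlinarith
  · intro h
    by_contra hlt
    push_neg at hlt
    have : c * v + r ≤ ((pvRC v m r : Int) - 1) * v + r := by nlinarith
    nlinarith

lemma pv_cover (nums : List Int) (v m : Int) (hv : 0 < v) (hm : 0 ≤ m)
    (hP : ∀ r, 0 ≤ r → r < v → m ≤ pvT nums v r) : m ≤ (nums.length : Int) := by
  have key : ∀ K : Nat, (K : Int) ≤ v → pvG v (PySem.List.pyRange 0 m 1) K ≤ pvG v nums K := by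
    intro K
    induction K with
    | zero => intro _; simp only [Nat.cast_zero]; rw [pv_G_zero v hv, pv_G_zero v hv]
    | succ K ih =>
      intro hK
      push_cast at hK
      have hKv : (K : Int) < v := by omega
      have e1 : ((K : Int) + 1 : Int) = ((K + 1 : Nat) : Int) := by push_cast; ring
      rw [show ((K + 1 : Nat) : Int) = (K : Int) + 1 by push_cast; ring,
          pv_G_succ, pv_G_succ]
      have hcnt : pvRC v m (K : Int) ≤ pvC nums v (K : Int) := by
        have := (pv_RC_le_iff v hv (K : Int) (by positivity) hKv m hm (pvC nums v (K : Int))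
          (by positivity)).mpr (hP (K : Int) (by positivity) hKv)
        exact_mod_cast this
      have := ih (by omega)
      unfold pvRC pvC at hcnt
      omega
  have hfin := key v.toNat (by omega)
  have hall : pvG v (PySem.List.pyRange 0 m 1) (v.toNat : Int) = m.toNat := by
    unfold pvG
    rw [List.countP_eq_length.mpr, PySem.List.length_pyRange_one]
    · omega
    · intro i _
      simp only [decide_eq_true_eq]
      have := Int.emod_lt_of_pos i hv
      omega
  have hlen : pvG v nums (v.toNat : Int) ≤ nums.length := by unfold pvG; exact List.countP_le_length
  omega

lemma pv_pigeon (nums : List Int) (v : Int) (hv : 0 < v) :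
    ∃ r, 0 ≤ r ∧ r ≤ (nums.length : Int) ∧ pvC nums v r = 0 := by
  by_contra h
  push_neg at h
  have key : ∀ K : Nat, K ≤ nums.length + 1 → K ≤ pvG v nums K := by
    intro K
    induction K with
    | zero => omega
    | succ K ih =>
      intro hK
      rw [show ((K + 1 : Nat) : Int) = (K : Int) + 1 by push_cast; ring, pv_G_succ]
      have h1 : pvC nums v (K : Int) ≠ 0 := h (K : Int) (by positivity) (by exact_mod_cast by omega)
      unfold pvC at h1
      have := ih (by omega)
      omega
  have h1 := key (nums.length + 1) (by omega)
  have h2 : pvG v nums ((nums.length + 1 : Nat) : Int) ≤ nums.length := by unfold pvG; exact List.countP_le_length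
  omega

lemma pv_possibleGo_iff (value : Int) (is : List Int) : ∀ (s : PySem.Dict Int Int),
    (∀ j c, s.get? j = some c → 1 ≤ c) →
    (pvPossibleGo value s is = true ↔
      ∀ j, ((is.countP (fun i => PySem.Int.mod i value == j)) : Int) ≤ s.getD j 0) := by
  induction is with
  | nil =>
    intro s hinv
    simp only [pvPossibleGo, List.countP_nil, Nat.cast_zero, true_iff]
    intro j
    rcases hg : s.get? j with _ | c
    · rw [PySem.Dict.getD_of_get?_eq_none s 0 hg]
    · rw [PySem.Dict.getD_of_get?_eq_some s 0 hg]
      exact le_trans (by omega) (hinv j c hg)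
  | cons i rest ih =>
    intro s hinv
    simp only [pvPossibleGo]
    by_cases hc : s.contains (PySem.Int.mod i value)
    · rw [if_neg (by simp [hc])]
      have hg : ∃ c, s.get? (PySem.Int.mod i value) = some c := by
        rw [PySem.Dict.contains_eq_isSome_get?] at hc
        cases hgg : s.get? (PySem.Int.mod i value)
        · rw [hgg] at hc; simp at hc
        · exact ⟨_, rfl⟩
      obtain ⟨c, hgc⟩ := hg
      have hc1 : 1 ≤ c := hinv _ c hgc
      have hgd : s.getD (PySem.Int.mod i value) 0 = c := PySem.Dict.getD_of_get?_eq_some s 0 hgc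
      rw [hgd, PySem.Dict.getD_insert_self]
      by_cases hz : c - 1 = 0
      · rw [if_pos hz]
        have hinv' : ∀ j c', ((s.insert (PySem.Int.mod i value) (c - 1)).erase (PySem.Int.mod i value)).get? j = some c' → 1 ≤ c' := by
          intro j c' hj
          rw [pv_get?_erase] at hj
          by_cases hjj : j = PySem.Int.mod i value
          · rw [if_pos hjj] at hj; cases hj
          · rw [if_neg hjj] at hj
            rw [PySem.Dict.get?_insert] at hj
            rw [if_neg hjj] at hj
            exact hinv j c' hj
        rw [ih _ hinv']
        have hgd' : ∀ j, ((s.insert (PySem.Int.mod i value) (c - 1)).erase (PySem.Int.mod i value)).getD j 0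
            = if j = PySem.Int.mod i value then 0 else s.getD j 0 := by
          intro j
          by_cases hjj : j = PySem.Int.mod i value
          · rw [if_pos hjj]
            apply PySem.Dict.getD_of_get?_eq_none
            rw [pv_get?_erase, if_pos hjj]
          · rw [if_neg hjj, PySem.Dict.getD_eq_get?_getD, pv_get?_erase, if_neg hjj,
                PySem.Dict.get?_insert, if_neg hjj, ← PySem.Dict.getD_eq_get?_getD]
        constructor
        · intro H j
          have := H j
          rw [hgd' j] at this
          rw [List.countP_cons]
          by_cases hjj : j = PySem.Int.mod i value
          · subst hjj
            simp only [beq_self_eq_true, if_pos]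
            rw [hgd]
            rw [if_pos rfl] at this
            push_cast
            omega
          · have : ((rest.countP fun i_1 => PySem.Int.mod i_1 value == j) : Int) ≤ s.getD j 0 := by
              rw [if_neg hjj] at this; exact this
            have hne : (PySem.Int.mod i value == j) = false := by
              simp only [beq_eq_false_iff_ne, ne_eq]
              exact fun hh => hjj hh.symm
            rw [hne]
            simpa using this
        · intro H j
          rw [hgd' j]
          have := H j
          rw [List.countP_cons] at this
          by_cases hjj : j = PySem.Int.mod i value
          · rw [if_pos hjj]
            subst hjj
            rw [hgd] at this
            simp only [beq_self_eq_true, if_pos] at this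
            push_cast at this ⊢
            omega
          · rw [if_neg hjj]
            have hne : (PySem.Int.mod i value == j) = false := by
              simp only [beq_eq_false_iff_ne, ne_eq]
              exact fun hh => hjj hh.symm
            rw [hne] at this
            simpa using this
      · rw [if_neg hz]
        have hinv' : ∀ j c', (s.insert (PySem.Int.mod i value) (c - 1)).get? j = some c' → 1 ≤ c' := by
          intro j c' hj
          rw [PySem.Dict.get?_insert] at hj
          by_cases hjj : j = PySem.Int.mod i value
          · rw [if_pos hjj] at hj; cases hj; omega
          · rw [if_neg hjj] at hj; exact hinv j c' hj
        rw [ih _ hinv']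
        have hgd' : ∀ j, (s.insert (PySem.Int.mod i value) (c - 1)).getD j 0
            = if j = PySem.Int.mod i value then c - 1 else s.getD j 0 := by
          intro j
          rw [PySem.Dict.getD_insert]
        constructor
        · intro H j
          have := H j
          rw [hgd' j] at this
          rw [List.countP_cons]
          by_cases hjj : j = PySem.Int.mod i value
          · subst hjj
            simp only [beq_self_eq_true, if_pos]
            rw [hgd]
            rw [if_pos rfl] at this
            push_cast
            omega
          · have h2 : ((rest.countP fun i_1 => PySem.Int.mod i_1 value == j) : Int) ≤ s.getD j 0 := by
              rw [if_neg hjj] at this; exact this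
            have hne : (PySem.Int.mod i value == j) = false := by
              simp only [beq_eq_false_iff_ne, ne_eq]
              exact fun hh => hjj hh.symm
            rw [hne]
            simpa using h2
        · intro H j
          rw [hgd' j]
          have := H j
          rw [List.countP_cons] at this
          by_cases hjj : j = PySem.Int.mod i value
          · rw [if_pos hjj]
            subst hjj
            rw [hgd] at this
            simp only [beq_self_eq_true, if_pos] at this
            push_cast at this ⊢
            omega
          · rw [if_neg hjj]
            have hne : (PySem.Int.mod i value == j) = false := by
              simp only [beq_eq_false_iff_ne, ne_eq]
              exact fun hh => hjj hh.symm
            rw [hne] at this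
            simpa using this
    · rw [if_pos (by simp [hc])]
      constructor
      · intro h; cases h
      · intro H
        exfalso
        have := H (PySem.Int.mod i value)
        rw [List.countP_cons] at this
        simp only [beq_self_eq_true, if_pos] at this
        have hgd : s.getD (PySem.Int.mod i value) 0 = 0 :=
          PySem.Dict.getD_of_not_contains _ _ (by simpa using hc)
        rw [hgd] at this
        push_cast at this
        omega

lemma pv_count_map (a : Int) (xs : List Int) (f : Int → Int) :
    (xs.map f).count a = xs.countP (fun x => f x == a) := by
  rw [List.count, List.countP_map]; rfl

-- getD of A's counter is the residue-class count
lemma pv_stA_getD (nums : List Int) (value j : Int) :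
    (pvStA nums value).getD j 0 = ((nums.countP (fun x => PySem.Int.mod x value == j)) : Int) := by
  rw [pv_stA_eq, PySem.Dict.getD_counter, pv_count_map]


lemma pv_stA_get?_inv (nums : List Int) (value : Int) :
    ∀ j c, (pvStA nums value).get? j = some c → 1 ≤ c := by
  intro j c hg
  have hcont : (pvStA nums value).contains j = true := by
    rw [PySem.Dict.contains_eq_isSome_get?, hg]; rfl
  rw [pv_stA_eq] at hcont hg
  rw [PySem.Dict.contains_counter] at hcont
  have hmem : j ∈ nums.map (fun x => PySem.Int.mod x value) := by
    simpa using hcont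
  have hpos : 0 < (nums.map (fun x => PySem.Int.mod x value)).count j :=
    List.count_pos_iff.mpr hmem
  have := PySem.Dict.getD_of_get?_eq_some _ (0 : Int) hg
  rw [PySem.Dict.getD_counter] at this
  omega

-- residue congruences
lemma pv_mod_self (v r : Int) (hr : 0 ≤ r) (hrv : r < v) : r % v = r :=
  Int.emod_eq_of_lt hr hrv

lemma pv_pred_eq (value : Int) (hv : value ≠ 0) (r : Int) (hr : 0 ≤ r) (hrv : r < |value|) (i : Int) :
    (PySem.Int.mod i value == PySem.Int.mod r value) = (i % |value| == r) := by
  apply Bool.eq_iff_iff.mpr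
  simp only [beq_iff_eq]
  rw [pv_mod_eq_iff value i r hv, pv_mod_self |value| r hr hrv]

lemma pv_countP_pred (value : Int) (hv : value ≠ 0) (r : Int) (hr : 0 ≤ r) (hrv : r < |value|) (l : List Int) :
    l.countP (fun x => PySem.Int.mod x value == PySem.Int.mod r value) = l.countP (fun x => x % |value| == r) :=
  List.countP_congr (fun x _ => by rw [pv_pred_eq value hv r hr hrv x])

lemma pv_possible_iff (nums : List Int) (value m : Int) (hv : value ≠ 0) (hm : 0 ≤ m) :
    (pvPossible (pvStA nums value) value m = true ↔
      ∀ r, 0 ≤ r → r < |value| → m ≤ pvT nums |value| r) := by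
  have hv0 : 0 < |value| := by positivity
  unfold pvPossible
  rw [pv_possibleGo_iff value _ _ (pv_stA_get?_inv nums value)]
  constructor
  · intro H r hr hrv
    have := H (PySem.Int.mod r value)
    rw [pv_stA_getD] at this
    rw [pv_countP_pred value hv r hr hrv, pv_countP_pred value hv r hr hrv] at this
    exact (pv_RC_le_iff |value| hv0 r hr hrv m hm _ (by positivity)).mp this
  · intro H j
    rcases Nat.eq_zero_or_pos ((PySem.List.pyRange 0 m 1).countP (fun i => PySem.Int.mod i value == j)) with h0 | hpos
    · rw [h0, pv_stA_getD]
      push_cast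
      positivity
    · obtain ⟨i, hi, hji⟩ := List.countP_pos_iff.mp hpos
      have hjeq : j = PySem.Int.mod (i % |value|) value := by
        have := (pv_mod_eq_iff value i (i % |value|) hv).mpr (by rw [Int.emod_emod_of_dvd i dvd_rfl])
        simp only [beq_iff_eq] at hji
        rw [← hji, this]
      set r := i % |value|
      have hr : 0 ≤ r := Int.emod_nonneg i (by omega)
      have hrv : r < |value| := Int.emod_lt_of_pos i hv0
      subst hjeq
      rw [pv_stA_getD]
      rw [pv_countP_pred value hv r hr hrv, pv_countP_pred value hv r hr hrv]
      exact (pv_RC_le_iff |value| hv0 r hr hrv m hm _ (by positivity)).mpr (H r hr hrv)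

lemma pv_alt_spec (nums : List Int) (value : Int) (hv : value ≠ 0) :
    (0 ≤ findSmallestInteger_alt nums value) ∧
    (findSmallestInteger_alt nums value ≤ (nums.length : Int)) ∧
    (∀ r, 0 ≤ r → r < |value| → findSmallestInteger_alt nums value ≤ pvT nums |value| r) ∧
    (∃ r0, 0 ≤ r0 ∧ r0 < |value| ∧ findSmallestInteger_alt nums value = pvT nums |value| r0) := by
  have hv0 : 0 < |value| := by positivity
  set W := min |value| ((nums.length : Int) + 1) with hW
  have hW0 : 0 < W := by omega
  have hmapeq : (PySem.List.pyRange 0 W 1).map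
      (fun r => (PySem.Dict.counter (nums.map (fun x => PySem.Int.mod x value))).getD (PySem.Int.mod r value) 0 * |value| + r)
      = (PySem.List.pyRange 0 W 1).map (fun r => pvT nums |value| r) := by
    apply List.map_congr_left
    intro r hrm
    have hr := PySem.List.mem_pyRange_one.mp hrm
    rw [PySem.Dict.getD_counter, pv_count_map]
    rw [pv_countP_pred value hv r (by omega) (by omega)]
    unfold pvT pvC
    push_cast
    ring
  have halt : findSmallestInteger_alt nums value
      = ((PySem.List.min? ((PySem.List.pyRange 0 W 1).map (fun r => pvT nums |value| r)) (fun t => t)).getD 0) := by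
    simp only [findSmallestInteger_alt]
    rw [← hW, hmapeq]
  have hne : ((PySem.List.pyRange 0 W 1).map (fun r => pvT nums |value| r)) ≠ [] := by
    intro h
    have := congrArg List.length h
    rw [List.length_map, PySem.List.length_pyRange_one] at this
    simp at this
    omega
  rcases hmin : PySem.List.min? ((PySem.List.pyRange 0 W 1).map (fun r => pvT nums |value| r)) (fun t => t) with _ | b
  · exact absurd ((PySem.List.min?_eq_none_iff _ _).mp hmin) hne
  have hbeq : findSmallestInteger_alt nums value = b := by rw [halt, hmin]; rfl
  have hbmem := PySem.List.min?_mem hmin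
  obtain ⟨r0, hr0m, hr0e⟩ := List.mem_map.mp hbmem
  have hr0 := PySem.List.mem_pyRange_one.mp hr0m
  have hmin' : ∀ r, 0 ≤ r → r < W → b ≤ pvT nums |value| r := by
    intro r hr hrW
    exact PySem.List.min?_isMin hmin _ (List.mem_map.mpr ⟨r, PySem.List.mem_pyRange_one.mpr ⟨hr, hrW⟩, rfl⟩)
  have hb0 : 0 ≤ b := by
    rw [← hr0e]
    unfold pvT
    have : (0:Int) ≤ (pvC nums |value| r0 : Int) * |value| := by positivity
    omega
  have hbn : b ≤ (nums.length : Int) := by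
    by_cases hcase : |value| ≤ (nums.length : Int) + 1
    · have hWv : W = |value| := by omega
      apply pv_cover nums |value| b hv0 hb0
      intro r hr hrv
      exact hmin' r hr (by omega)
    · obtain ⟨r', hr'0, hr'n, hr'C⟩ := pv_pigeon nums |value| hv0
      have : b ≤ pvT nums |value| r' := hmin' r' hr'0 (by omega)
      unfold pvT at this
      rw [hr'C] at this
      push_cast at this
      omega
  have hball : ∀ r, 0 ≤ r → r < |value| → b ≤ pvT nums |value| r := by
    intro r hr hrv
    by_cases hrW : r < W
    · exact hmin' r hr hrW
    · have : (nums.length : Int) + 1 ≤ r := by omega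
      unfold pvT
      have h1 : (0:Int) ≤ (pvC nums |value| r : Int) * |value| := by positivity
      omega
  rw [hbeq]
  exact ⟨hb0, hbn, hball, r0, by omega, by omega, hr0e.symm⟩

lemma pv_bsearch_eq (st : PySem.Dict Int Int) (value K : Int) :
    ∀ (N : Nat) (l r : Int), (r - l).toNat ≤ N → l ≤ K → K ≤ r →
    (∀ m, l ≤ m → m < r → (pvPossible st value m = true ↔ m < K)) →
    pvBSearch st value l r = K := by
  intro N
  induction N with
  | zero =>
    intro l r hN hlK hKr hiff
    rw [pvBSearch]
    rw [dif_neg (by omega)]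
    omega
  | succ N ih =>
    intro l r hN hlK hKr hiff
    rw [pvBSearch]
    by_cases h : l < r
    · rw [dif_pos h]
      have hd : PySem.Int.floordiv (r - l) 2 = (r - l) / 2 := PySem.Int.floordiv_eq_ediv_of_pos (by omega)
      simp only [hd]
      set mid := l + (r - l) / 2 with hmid
      have hmb : l ≤ mid ∧ mid < r := by omega
      rcases hp : pvPossible st value mid with hf | ht
      · have hKmid : ¬ (mid < K) := fun hc => by
          have := (hiff mid hmb.1 hmb.2).mpr hc
          rw [hp] at this; cases this
        simp only [Bool.false_eq_true, if_neg]
        exact ih l mid (by omega) hlK (by omega) (fun m h1 h2 => hiff m h1 (by omega))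
      · have hKmid : mid < K := (hiff mid hmb.1 hmb.2).mp hp
        simp only [if_pos]
        exact ih (mid + 1) r (by omega) (by omega) hKr (fun m h1 h2 => hiff m (by omega) h2)
    · rw [dif_neg h]
      omega

-- ===== VERDICT (by name: the statement is the Claim_ definition above) =====
theorem findSmallestInteger_spec : Claim_equal_findSmallestInteger := by
  intro nums value _ hv
  unfold Spec_findSmallestInteger findSmallestInteger
  obtain ⟨hb0, hbn, hble, r0, hr00, hr0v, hr0eq⟩ := pv_alt_spec nums value hv
  have hbs := pv_bsearch_eq (pvStA nums value) value (findSmallestInteger_alt nums value + 1)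
    ((nums.length : Int) + 1).toNat 0 ((nums.length : Int) + 1) (by omega) (by omega) (by omega) ?_
  · omega
  · intro m hm0 hmr
    rw [pv_possible_iff nums value m hv hm0]
    constructor
    · intro h
      have := h r0 hr00 hr0v
      omega
    · intro h r hr hrv
      exact le_trans (by omega) (hble r hr hrv)
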